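-- pv_equiv track=rewrite | github.com/wonza-hub/Algorithm | 프로그래머스(코테입문)/문자열 밀기.py | solution
-- ===== SOURCE A (Python) =====
-- def solution(A, B):
--     A*=2
--     s,e=(len(A)-1)//2+1,len(A)-1
--     ans=0
--     while s>0:
--         if A[s:e+1]==B:
--             break
--         ans+=1
--         s-=1
--         e-=1
--     else:
--         ans=-1
--
--     return ans
-- ===== SOURCE B (Python) =====
-- def solution(A, B):
--     n = len(A)
--     if n == 0 or len(B) != n:
--         return -1
--     # KMP failure function of B: fail[i] = longest proper border of B[:i+1]
--     fail = [0]
--     k = 0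
--     for i in range(1, n):
--         while k > 0 and B[i] != B[k]:
--             k = fail[k - 1]
--         if B[i] == B[k]:
--             k += 1
--         fail.append(k)
--     # KMP scan of A+A for B, remembering the offset of the last (rightmost) match
--     T = A + A
--     best = -1
--     k = 0
--     for i in range(2 * n):
--         while k > 0 and T[i] != B[k]:
--             k = fail[k - 1]
--         if T[i] == B[k]:
--             k += 1
--         if k == n:
--             best = i - n + 1
--             k = fail[n - 1]
--     return -1 if best < 0 else n - best
-- ===== Notes on version B (the rewrite author's own statement) =====
-- stated objective: faster
-- what changed: Replaces A's per-rotation length-n slice comparisons over the doubled string with a KMP search (failure function of B, single linear scan of A+A keeping the last match offset), turning O(n^2) character work into O(n).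
import Mathlib
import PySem

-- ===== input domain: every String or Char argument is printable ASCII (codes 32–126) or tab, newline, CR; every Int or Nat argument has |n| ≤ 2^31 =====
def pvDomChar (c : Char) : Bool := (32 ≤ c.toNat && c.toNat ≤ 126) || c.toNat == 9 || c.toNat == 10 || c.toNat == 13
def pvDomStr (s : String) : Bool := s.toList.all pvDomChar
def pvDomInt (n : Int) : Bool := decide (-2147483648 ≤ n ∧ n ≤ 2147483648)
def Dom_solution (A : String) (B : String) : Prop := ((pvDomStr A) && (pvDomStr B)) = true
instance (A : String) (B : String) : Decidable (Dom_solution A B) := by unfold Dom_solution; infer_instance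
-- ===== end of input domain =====

-- B replaces A's per-rotation slice comparisons over the doubled string by a KMP search
-- (failure function of B, one scan of A+A keeping the last match offset); objective: faster.

-- ===== PORT A =====
-- The while loop: the loop variable s stays ≥ 0 (it starts at (len-1)//2+1 ≥ 0 and the
-- loop stops before it passes 0), so it is tracked as a Nat fuel; fuel 0 = the `else`
-- clause of the exhausted `while` (ans = -1). e and ans stay Int as in the Python.
def solutionGo (AA Bl : List Char) : Nat → Int → Int → Int
  | 0, _, _ => -1
  | s + 1, e, ans =>
      if PySem.List.slice AA (some ((s : Int) + 1)) (some (e + 1)) = Bl then ans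
      else solutionGo AA Bl s (e - 1) (ans + 1)

def solution (A : String) (B : String) : Int :=
  let AA := (A ++ A).toList                      -- A *= 2
  let s : Int := PySem.Int.floordiv ((AA.length : Int) - 1) 2 + 1
  let e : Int := (AA.length : Int) - 1
  solutionGo AA B.toList s.toNat e 0

-- ===== PORT B =====
-- `while k > 0 and X[i] != B[k]: k = fail[k-1]` — k strictly decreases each pass
-- (fail[k-1] ≤ k-1 for the failure function built below), so fuel = initial k is exact.
def kmpWhile (p : List Char) (fail : List Nat) (c : Char) : Nat → Nat → Nat
  | 0, k => k
  | fuel + 1, k =>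
      if 0 < k ∧ ¬ c = p.getD k ' ' then kmpWhile p fail c fuel (fail.getD (k - 1) 0) else k

-- the while loop followed by `if X[i] == B[k]: k += 1`
def kmpStep (p : List Char) (fail : List Nat) (c : Char) (k : Nat) : Nat :=
  let r := kmpWhile p fail c k k
  if c = p.getD r ' ' then r + 1 else r

-- fail = [0]; for i in range(1, n): … ; fail.append(k)
def buildFail (p : List Char) : List Nat :=
  ((List.range' 1 (p.length - 1)).foldl
    (fun (st : List Nat × Nat) i =>
      let k := kmpStep p st.1 (p.getD i ' ') st.2
      (st.1 ++ [k], k)) ([0], 0)).1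

def solution_alt (A : String) (B : String) : Int :=
  let n := A.toList.length
  if n = 0 ∨ B.toList.length ≠ n then -1
  else
    let p := B.toList
    let fail := buildFail p
    let T := (A ++ A).toList
    let res := (List.range (2 * n)).foldl
      (fun (st : Int × Nat) i =>
        let k := kmpStep p fail (T.getD i ' ') st.2
        if k = n then (((i : Int) - (n : Int) + 1), fail.getD (n - 1) 0) else (st.1, k))
      (-1, 0)
    if res.1 < 0 then -1 else (n : Int) - res.1

-- ===== PRECONDITION & SPEC =====
def Spec_solution (A : String) (B : String) (out : Int) : Prop := out = solution_alt A B
instance (A : String) (B : String) (out : Int) : Decidable (Spec_solution A B out) := by unfold Spec_solution; infer_instance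

-- ===== CLAIM (what is proved, stated in full; the proofs are below) =====
def Claim_equal_solution : Prop := ∀ (A : String) (B : String), Dom_solution A B → Spec_solution A B (solution A B)

-- ===== LEMMAS AND PROOFS =====

-- longest l ≤ b such that p.take l is a suffix of u ("suffix-prefix length", bounded)
def splB (p : List Char) (b : Nat) (u : List Char) : Nat :=
  Nat.findGreatest (fun l => p.take l <:+ u) b

-- longest proper border of p.take l
def bordP (p : List Char) (l : Nat) : Nat := splB p (l - 1) (p.take l)

theorem solutionGo_zero (AA Bl : List Char) (e ans : Int) :
    solutionGo AA Bl 0 e ans = -1 := rfl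

theorem solutionGo_succ (AA Bl : List Char) (s : Nat) (e ans : Int) :
    solutionGo AA Bl (s + 1) e ans
      = if PySem.List.slice AA (some ((s : Int) + 1)) (some (e + 1)) = Bl then ans
        else solutionGo AA Bl s (e - 1) (ans + 1) := rfl

-- the slice A2[x : x+y] is take y (drop x A2)
theorem slice_window (l : List Char) (x y : Nat) :
    PySem.List.slice l (some (x : Int)) (some ((x : Int) + (y : Int)))
      = List.take y (List.drop x l) := by
  have h2 : (x : Int) + (y : Int) = ((x + y : Nat) : Int) := by push_cast; ring
  rw [h2, PySem.List.slice_natCast]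
  congr 1
  omega

theorem window_length (a : List Char) (s : Nat) (hs : s + 1 ≤ a.length) :
    (List.take a.length (List.drop (s + 1) (a ++ a))).length = a.length := by
  simp [List.length_take, List.length_drop]
  omega

-- window test = prefix test at the offset, when lengths agree
theorem window_eq_iff (a p : List Char) (s : Nat) (hp : p.length = a.length) :
    (List.take a.length (List.drop (s + 1) (a ++ a)) = p)
      ↔ p <+: List.drop (s + 1) (a ++ a) := by
  rw [List.prefix_iff_eq_take, hp]
  constructor
  · intro h; exact h.symm
  · intro h; exact h.symm

-- length mismatch: every window fails, the loop runs to the else clause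
theorem solutionGo_len_ne (a Bl : List Char) (hB : Bl.length ≠ a.length) :
    ∀ (s : Nat) (e ans : Int), s ≤ a.length → e = (s : Int) + (a.length : Int) - 1 →
      solutionGo (a ++ a) Bl s e ans = -1 := by
  intro s
  induction s with
  | zero => intro e ans _ _; rfl
  | succ m ih =>
      intro e ans hle he
      have hc : ((m : Int) + 1) = ((m + 1 : Nat) : Int) := by push_cast; ring
      have he1 : e + 1 = ((m + 1 : Nat) : Int) + ((a.length : Nat) : Int) := by push_cast; omega
      rw [solutionGo_succ, hc, he1, slice_window (a ++ a) (m + 1) a.length, if_neg,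
        ih (e - 1) (ans + 1) (by omega) (by omega)]
      intro h
      have := congrArg List.length h
      rw [window_length a m hle] at this
      omega

-- A's loop result = rightmost matching offset in [1..s] (as Nat.findGreatest), else -1
theorem solutionGo_char (a p : List Char) (hp : p.length = a.length) :
    ∀ s : Nat, s ≤ a.length →
      solutionGo (a ++ a) p s ((s : Int) + (a.length : Int) - 1) ((a.length : Int) - (s : Int))
        = if ∃ i ≤ s, 0 < i ∧ p <+: List.drop i (a ++ a)
          then (a.length : Int)
                - (Nat.findGreatest (fun i => 0 < i ∧ p <+: List.drop i (a ++ a)) s : Int)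
          else -1 := by
  intro s
  induction s with
  | zero =>
      intro _
      rw [solutionGo_zero, if_neg]
      rintro ⟨i, hle, hi, _⟩; omega
  | succ m ih =>
      intro hle
      have hc : ((m : Int) + 1) = ((m + 1 : Nat) : Int) := by push_cast; ring
      have he1 : (((m + 1 : Nat) : Int) + (a.length : Int) - 1) + 1
          = ((m + 1 : Nat) : Int) + ((a.length : Nat) : Int) := by push_cast; ring
      rw [solutionGo_succ, hc, he1, slice_window (a ++ a) (m + 1) a.length]
      by_cases hw : List.take a.length (List.drop (m + 1) (a ++ a)) = p
      · have hmm : p <+: List.drop (m + 1) (a ++ a) := (window_eq_iff a p m hp).mp hw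
        rw [if_pos hw, if_pos ⟨m + 1, le_refl _, by omega, hmm⟩]
        have : Nat.findGreatest (fun i => 0 < i ∧ p <+: List.drop i (a ++ a)) (m + 1)
            = m + 1 := by
          rw [Nat.findGreatest_succ, if_pos ⟨by omega, hmm⟩]
        rw [this]
      · have hnm : ¬ (0 < m + 1 ∧ p <+: List.drop (m + 1) (a ++ a)) := by
          rintro ⟨_, hpre⟩; exact hw ((window_eq_iff a p m hp).mpr hpre)
        rw [if_neg hw]
        have e2 : (((m + 1 : Nat) : Int) + (a.length : Int) - 1) - 1
            = (m : Int) + (a.length : Int) - 1 := by push_cast; ring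
        have a2 : ((a.length : Int) - ((m + 1 : Nat) : Int)) + 1
            = (a.length : Int) - (m : Int) := by push_cast; ring
        rw [e2, a2, ih (by omega)]
        have hfg : Nat.findGreatest (fun i => 0 < i ∧ p <+: List.drop i (a ++ a)) (m + 1)
            = Nat.findGreatest (fun i => 0 < i ∧ p <+: List.drop i (a ++ a)) m := by
          rw [Nat.findGreatest_succ, if_neg hnm]
        have hex : (∃ i ≤ m, 0 < i ∧ p <+: List.drop i (a ++ a))
            ↔ (∃ i ≤ m + 1, 0 < i ∧ p <+: List.drop i (a ++ a)) := by
          constructor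
          · rintro ⟨i, h2, h1, h3⟩; exact ⟨i, by omega, h1, h3⟩
          · rintro ⟨i, h2, h1, h3⟩
            rcases Nat.lt_or_ge i (m + 1) with h | h
            · exact ⟨i, by omega, h1, h3⟩
            · have : i = m + 1 := by omega
              subst this; exact absurd ⟨h1, h3⟩ hnm
        rw [hfg]
        by_cases hE : ∃ i ≤ m, 0 < i ∧ p <+: List.drop i (a ++ a)
        · rw [if_pos hE, if_pos (hex.mp hE)]
        · rw [if_neg hE, if_neg (fun h => hE (hex.mpr h))]

-- starting index of A's loop: (2n-1)//2 + 1 = n for n ≥ 1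
theorem start_index (n : Nat) (_h : 1 ≤ n) :
    PySem.Int.floordiv (2 * (n : Int) - 1) 2 + 1 = (n : Int) := by
  unfold PySem.Int.floordiv
  rw [Int.fdiv_eq_ediv, if_pos (Or.inl (by norm_num))]
  omega

-- ---------- generic list lemmas ----------

-- suffixes of the same list are totally ordered by length
theorem suffix_of_suffix_length_le {s t u : List Char}
    (hs : s <:+ u) (ht : t <:+ u) (hlen : s.length ≤ t.length) : s <:+ t := by
  obtain ⟨v, hv⟩ := hs
  obtain ⟨w, hw⟩ := ht
  have hlw : w.length ≤ v.length := by
    have h1 := congrArg List.length hv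
    have h2 := congrArg List.length hw
    rw [List.length_append] at h1 h2
    omega
  refine ⟨v.drop w.length, ?_⟩
  have hkey : List.drop w.length (w ++ t) = List.drop w.length (v ++ s) := by
    rw [hv, hw]
  rw [List.drop_left, List.drop_append_of_le_length hlw] at hkey
  exact hkey.symm

theorem concat_suffix_concat {xs ys : List Char} {x y : Char} :
    (xs ++ [x]) <:+ (ys ++ [y]) ↔ xs <:+ ys ∧ x = y := by
  constructor
  · intro h
    have h' : x :: xs.reverse <+: y :: ys.reverse := by
      have := List.reverse_prefix.mpr h
      simpa using this
    rcases List.cons_prefix_cons.mp h' with ⟨hxy, hpre⟩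
    exact ⟨List.reverse_prefix.mp (by simpa using hpre), hxy⟩
  · rintro ⟨h, rfl⟩
    apply List.reverse_prefix.mp
    have h' : x :: xs.reverse <+: x :: ys.reverse :=
      List.cons_prefix_cons.mpr ⟨rfl, List.reverse_prefix.mpr h⟩
    simpa using h'

theorem take_concat_getD (l : List Char) (j : Nat) (h : j < l.length) :
    l.take (j + 1) = l.take j ++ [l.getD j ' '] := by
  rw [List.take_succ]
  congr 1
  rw [List.getElem?_eq_getElem h]
  simp [List.getD, List.getElem?_eq_getElem h]

-- ---------- splB / bordP basics ----------

theorem splB_le (p : List Char) (b : Nat) (u : List Char) : splB p b u ≤ b :=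
  Nat.findGreatest_le b

theorem splB_suffix (p : List Char) (b : Nat) (u : List Char) :
    p.take (splB p b u) <:+ u := by
  unfold splB
  exact Nat.findGreatest_spec (P := fun l => p.take l <:+ u) (Nat.zero_le b) (by simp)

theorem splB_ge (p : List Char) (b : Nat) (u : List Char) {l : Nat}
    (hl : l ≤ b) (h : p.take l <:+ u) : l ≤ splB p b u := by
  unfold splB
  exact Nat.le_findGreatest (P := fun l => p.take l <:+ u) hl h

theorem splB_succ (p : List Char) (b : Nat) (u : List Char) :
    splB p (b + 1) u = if p.take (b + 1) <:+ u then b + 1 else splB p b u := by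
  unfold splB
  exact Nat.findGreatest_succ (P := fun l => p.take l <:+ u) b

-- when p itself is a suffix of v, the bounded suffix-prefixes of v are the borders of p
theorem splB_reset (p v : List Char) (b : Nat) (hpv : p <:+ v) :
    splB p b p = splB p b v := by
  apply Nat.le_antisymm
  · exact splB_ge p b v (splB_le p b p) ((splB_suffix p b p).trans hpv)
  · apply splB_ge p b p (splB_le p b v)
    exact suffix_of_suffix_length_le (splB_suffix p b v) hpv
      (by simpa using List.length_take_le _ _)

theorem splB_nil (p : List Char) (b : Nat) (hp : 1 ≤ p.length) : splB p b [] = 0 := by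
  have hs := splB_suffix p b []
  have h0 : p.take (splB p b []) = [] := List.suffix_nil.mp hs
  rcases List.take_eq_nil_iff.mp h0 with h | h
  · exact h
  · rw [h] at hp; simp at hp

-- ---------- the KMP step computes the suffix-prefix recurrence ----------

theorem kmpWhile_spec (p : List Char) (fail : List Nat) (u : List Char) (c : Char) (b : Nat)
    (hb : b + 1 ≤ p.length)
    (hfail : ∀ j, j < b → fail.getD j 0 = bordP p (j + 1)) :
    ∀ fuel k, k ≤ fuel → k ≤ b → p.take k <:+ u →
      splB p (b + 1) (u ++ [c]) ≤ k + 1 →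
      (let r := kmpWhile p fail c fuel k;
       if c = p.getD r ' ' then r + 1 else r) = splB p (b + 1) (u ++ [c]) := by
  intro fuel
  induction fuel with
  | zero =>
      intro k hk _ _ htgt
      have hk0 : k = 0 := by omega
      subst hk0
      show (if c = p.getD (kmpWhile p fail c 0 0) ' ' then _ else _) = _
      simp only [kmpWhile]
      by_cases hc : c = p.getD 0 ' '
      · rw [if_pos hc]
        refine (Nat.le_antisymm htgt ?_).symm
        apply splB_ge p (b + 1) (u ++ [c]) (by omega)
        rw [take_concat_getD p 0 (by omega)]
        exact concat_suffix_concat.mpr ⟨by simp, hc.symm⟩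
      · rw [if_neg hc]
        by_contra h
        have h1 : splB p (b + 1) (u ++ [c]) = 1 := by omega
        have hsfx := splB_suffix p (b + 1) (u ++ [c])
        rw [h1, take_concat_getD p 0 (by omega)] at hsfx
        rcases concat_suffix_concat.mp hsfx with ⟨_, hxy⟩
        exact hc hxy.symm
  | succ fuel ih =>
      intro k hk hkb hsfx htgt
      show (if c = p.getD (kmpWhile p fail c (fuel + 1) k) ' ' then _ else _) = _
      simp only [kmpWhile]
      by_cases hcond : 0 < k ∧ ¬ c = p.getD k ' '
      · rw [if_pos hcond]
        rcases hcond with ⟨hk0, hne⟩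
        have hfk : fail.getD (k - 1) 0 = bordP p k := by
          have := hfail (k - 1) (by omega)
          rwa [Nat.sub_add_cancel hk0] at this
        have hk2 : fail.getD (k - 1) 0 = splB p (k - 1) (p.take k) := by
          rw [hfk]; rfl
        have hk2le : fail.getD (k - 1) 0 ≤ k - 1 := by rw [hk2]; exact splB_le _ _ _
        have hk2sfx : p.take (fail.getD (k - 1) 0) <:+ u := by
          rw [hk2]; exact (splB_suffix p (k - 1) (p.take k)).trans hsfx
        have htgt2 : splB p (b + 1) (u ++ [c]) ≤ fail.getD (k - 1) 0 + 1 := by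
          by_contra hlt
          push_neg at hlt
          have hts := splB_suffix p (b + 1) (u ++ [c])
          have htb := splB_le p (b + 1) (u ++ [c])
          obtain ⟨j, hj⟩ : ∃ j, splB p (b + 1) (u ++ [c]) = j + 1 :=
            ⟨splB p (b + 1) (u ++ [c]) - 1, by omega⟩
          rw [hj] at hts hlt htgt
          have hjk : j ≤ k := by omega
          have hjlen : j < p.length := by omega
          rw [take_concat_getD p j hjlen] at hts
          rcases concat_suffix_concat.mp hts with ⟨hju, hjc⟩
          have hjk' : j < k := by
            rcases Nat.lt_or_ge j k with h | h
            · exact h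
            · have : j = k := by omega
              subst this; exact absurd hjc.symm hne
          have hjin : p.take j <:+ p.take k :=
            suffix_of_suffix_length_le hju hsfx
              (by rw [List.length_take, List.length_take]; omega)
          have := splB_ge p (k - 1) (p.take k) (by omega) hjin
          rw [← hk2] at this
          omega
        exact ih (fail.getD (k - 1) 0) (by omega) (by omega) hk2sfx htgt2
      · rw [if_neg hcond]
        by_cases hc : c = p.getD k ' '
        · rw [if_pos hc]
          refine (Nat.le_antisymm htgt ?_).symm
          apply splB_ge p (b + 1) (u ++ [c]) (by omega)
          rw [take_concat_getD p k (by omega)]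
          exact concat_suffix_concat.mpr ⟨hsfx, hc.symm⟩
        · have hk0 : k = 0 := by
            by_contra h
            exact hcond ⟨by omega, hc⟩
          subst hk0
          rw [if_neg hc]
          by_contra h
          have h1 : splB p (b + 1) (u ++ [c]) = 1 := by omega
          have hsfx2 := splB_suffix p (b + 1) (u ++ [c])
          rw [h1, take_concat_getD p 0 (by omega)] at hsfx2
          rcases concat_suffix_concat.mp hsfx2 with ⟨_, hxy⟩
          exact hc hxy.symm

theorem kmpStep_spec (p : List Char) (fail : List Nat) (u : List Char) (c : Char)
    (b k : Nat) (hb : b + 1 ≤ p.length)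
    (hfail : ∀ j, j < b → fail.getD j 0 = bordP p (j + 1))
    (hk : k = splB p b u) :
    kmpStep p fail c k = splB p (b + 1) (u ++ [c]) := by
  have hkb : k ≤ b := hk ▸ splB_le p b u
  have hsfx : p.take k <:+ u := hk ▸ splB_suffix p b u
  have htgt : splB p (b + 1) (u ++ [c]) ≤ k + 1 := by
    by_contra hlt
    push_neg at hlt
    have hts := splB_suffix p (b + 1) (u ++ [c])
    have htb := splB_le p (b + 1) (u ++ [c])
    obtain ⟨j, hj⟩ : ∃ j, splB p (b + 1) (u ++ [c]) = j + 1 :=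
      ⟨splB p (b + 1) (u ++ [c]) - 1, by omega⟩
    rw [hj] at hts hlt htb
    have hjlen : j < p.length := by omega
    rw [take_concat_getD p j hjlen] at hts
    rcases concat_suffix_concat.mp hts with ⟨hju, _⟩
    have := splB_ge p b u (by omega) hju
    omega
  exact kmpWhile_spec p fail u c b hb hfail k k le_rfl hkb hsfx htgt

-- ---------- the failure-function build loop ----------

theorem getD_map_range (g : Nat → Nat) (n j : Nat) (h : j < n) :
    (((List.range n).map g).getD j 0) = g j := by
  simp [List.getD, List.getElem?_map, List.getElem?_range, h]

theorem buildFail_aux (p : List Char) (hp : 1 ≤ p.length) :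
    ∀ m, m + 1 ≤ p.length →
      ((List.range' 1 m).foldl
        (fun (st : List Nat × Nat) i =>
          let k := kmpStep p st.1 (p.getD i ' ') st.2
          (st.1 ++ [k], k)) ([0], 0))
        = ((List.range (m + 1)).map (fun j => bordP p (j + 1)), bordP p (m + 1)) := by
  intro m
  induction m with
  | zero =>
      intro _
      simp [List.range'_zero, List.foldl_nil, List.range_succ, bordP, splB]
  | succ m ih =>
      intro hm
      have hrange : List.range' 1 (m + 1) = List.range' 1 m ++ [m + 1] := by
        rw [List.range'_concat]
        norm_num
        omega
      rw [hrange, List.foldl_append, ih (by omega), List.foldl_cons, List.foldl_nil]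
      have hfail : ∀ j, j < m + 1 →
          (((List.range (m + 1)).map (fun j => bordP p (j + 1))).getD j 0) = bordP p (j + 1) := by
        intro j hj; exact getD_map_range _ _ _ hj
      have hstep : kmpStep p ((List.range (m + 1)).map (fun j => bordP p (j + 1)))
            (p.getD (m + 1) ' ') (bordP p (m + 1)) = bordP p (m + 2) := by
        have := kmpStep_spec p ((List.range (m + 1)).map (fun j => bordP p (j + 1)))
          (p.take (m + 1)) (p.getD (m + 1) ' ') m (bordP p (m + 1))
          (by omega) (fun j hj => hfail j (by omega)) (by rfl)
        rw [this, ← take_concat_getD p (m + 1) (by omega)]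
        rfl
      simp only [hstep]
      rw [List.range_succ (n := m + 1), List.map_append]
      norm_num

theorem buildFail_spec (p : List Char) (hp : 1 ≤ p.length) :
    buildFail p = (List.range p.length).map (fun j => bordP p (j + 1)) := by
  unfold buildFail
  rw [buildFail_aux p hp (p.length - 1) (by omega), Nat.sub_add_cancel hp]

-- ---------- the scan loop ----------

theorem scan_aux (p T : List Char) (n : Nat) (hn : p.length = n) (h1 : 1 ≤ n)
    (hT : T.length = 2 * n) :
    ∀ m, m ≤ 2 * n →
      (((List.range m).foldl
        (fun (st : Int × Nat) i =>
          let k := kmpStep p (buildFail p) (T.getD i ' ') st.2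
          if k = n then (((i : Int) - (n : Int) + 1), (buildFail p).getD (n - 1) 0)
          else (st.1, k)) (-1, 0)).2
          = splB p (n - 1) (T.take m))
      ∧ ((((List.range m).foldl
        (fun (st : Int × Nat) i =>
          let k := kmpStep p (buildFail p) (T.getD i ' ') st.2
          if k = n then (((i : Int) - (n : Int) + 1), (buildFail p).getD (n - 1) 0)
          else (st.1, k)) (-1, 0)).1 = -1 ∧ ∀ e, e < m → ¬ p <:+ T.take (e + 1))
        ∨ (∃ e, e < m ∧ p <:+ T.take (e + 1)
            ∧ (((List.range m).foldl
              (fun (st : Int × Nat) i =>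
                let k := kmpStep p (buildFail p) (T.getD i ' ') st.2
                if k = n then (((i : Int) - (n : Int) + 1), (buildFail p).getD (n - 1) 0)
                else (st.1, k)) (-1, 0)).1 = (e : Int) - (n : Int) + 1)
            ∧ ∀ e', e' < m → p <:+ T.take (e' + 1) → e' ≤ e)) := by
  have hfail : ∀ j, j < n →
      ((buildFail p).getD j 0) = bordP p (j + 1) := by
    intro j hj
    rw [buildFail_spec p (by omega)]
    exact getD_map_range _ _ _ (by omega)
  have hpn : p.take n = p := by rw [← hn]; exact List.take_length
  intro m
  induction m with
  | zero =>
      intro _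
      constructor
      · simp [List.range_zero, List.foldl_nil, splB_nil p (n - 1) (by omega)]
      · left
        constructor
        · simp [List.range_zero, List.foldl_nil]
        · intro e he; omega
  | succ m ih =>
      intro hm
      obtain ⟨ihk, ihb⟩ := ih (by omega)
      rw [List.range_succ, List.foldl_append, List.foldl_cons, List.foldl_nil]
      set st := ((List.range m).foldl
        (fun (st : Int × Nat) i =>
          let k := kmpStep p (buildFail p) (T.getD i ' ') st.2
          if k = n then (((i : Int) - (n : Int) + 1), (buildFail p).getD (n - 1) 0)
          else (st.1, k)) (-1, 0)) with hst
      have hkstep : kmpStep p (buildFail p) (T.getD m ' ') st.2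
          = splB p n (T.take (m + 1)) := by
        have := kmpStep_spec p (buildFail p) (T.take m) (T.getD m ' ') (n - 1) st.2
          (by omega) (fun j hj => hfail j (by omega)) (by rw [ihk])
        rw [take_concat_getD T m (by omega)]
        have hb1 : n - 1 + 1 = n := by omega
        rwa [hb1] at this
      simp only [hkstep]
      by_cases hmatch : splB p n (T.take (m + 1)) = n
      · have hpm : p <:+ T.take (m + 1) := by
          have := splB_suffix p n (T.take (m + 1))
          rw [hmatch, hpn] at this
          exact this
        rw [if_pos hmatch]
        constructor
        · show ((buildFail p).getD (n - 1) 0) = splB p (n - 1) (T.take (m + 1))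
          rw [hfail (n - 1) (by omega)]
          have hb1 : n - 1 + 1 = n := by omega
          rw [hb1]
          show splB p (n - 1) (p.take n) = _
          rw [hpn]
          exact splB_reset p (T.take (m + 1)) (n - 1) hpm
        · right
          refine ⟨m, by omega, hpm, rfl, ?_⟩
          intro e' he' _; omega
      · rw [if_neg hmatch]
        have hnomatch : ¬ p <:+ T.take (m + 1) := by
          intro h
          apply hmatch
          apply Nat.le_antisymm (splB_le _ _ _)
          apply splB_ge p n (T.take (m + 1)) le_rfl
          rwa [hpn]
        constructor
        · show splB p n (T.take (m + 1)) = splB p (n - 1) (T.take (m + 1))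
          have hb1 : n - 1 + 1 = n := by omega
          have hsucc := splB_succ p (n - 1) (T.take (m + 1))
          rw [hb1] at hsucc
          have hcond : ¬ (p.take n <:+ T.take (m + 1)) := by rw [hpn]; exact hnomatch
          rw [hsucc, if_neg hcond]
        · rcases ihb with ⟨hb1, hb2⟩ | ⟨e, he, hme, hbe, hmax⟩
          · left
            refine ⟨hb1, ?_⟩
            intro e he
            rcases Nat.lt_or_ge e m with h | h
            · exact hb2 e h
            · have : e = m := by omega
              subst this; exact hnomatch
          · right
            refine ⟨e, by omega, hme, hbe, ?_⟩
            intro e' he' hm'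
            rcases Nat.lt_or_ge e' m with h | h
            · exact hmax e' h hm'
            · have : e' = m := by omega
              subst this; exact absurd hm' hnomatch

-- ---------- end-position matches ↔ offset matches ----------

theorem match_iff_offset (a p : List Char) (n : Nat) (hn : a.length = n)
    (hp : p.length = n) (e : Nat) (he1 : n - 1 ≤ e) (he2 : e < 2 * n) :
    (p <:+ (a ++ a).take (e + 1)) ↔ p <+: (a ++ a).drop (e + 1 - n) := by
  have hTlen : (a ++ a).length = 2 * n := by rw [List.length_append]; omega
  have htlen : ((a ++ a).take (e + 1)).length = e + 1 := by
    rw [List.length_take]; omega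
  rw [List.suffix_iff_eq_drop, htlen, hp, List.prefix_iff_eq_take, hp,
    List.drop_take]
  have harith : e + 1 - n + n = e + 1 := by omega
  constructor
  · intro h
    rw [h]
    congr 1
    omega
  · intro h
    rw [h]
    congr 1
    omega

theorem no_short_match (a p : List Char) (n : Nat) (hn : a.length = n)
    (hp : p.length = n) (e : Nat) (he : e + 1 < n) :
    ¬ p <:+ (a ++ a).take (e + 1) := by
  intro h
  have := h.length_le
  rw [List.length_take, hp, List.length_append] at this
  omega

-- offset-0 match forces an offset-n match
theorem offset_zero (a p : List Char) (n : Nat) (hn : a.length = n) (hp : p.length = n)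
    (h : p <+: (a ++ a).drop 0) : p <+: (a ++ a).drop n := by
  rw [List.drop_zero] at h
  have hpa : p = a := by
    have := List.prefix_iff_eq_take.mp h
    rw [hp, ← hn, List.take_left] at this
    exact this
  rw [← hn, List.drop_left]
  rw [hpa]

-- ===== VERDICT (by name: the statement is the Claim_ definition above) =====
theorem solution_spec : Claim_equal_solution := by
  unfold Claim_equal_solution Spec_solution
  intro A B _
  unfold solution solution_alt
  simp only [String.toList_append]
  set a := A.toList with ha
  set p := B.toList with hb
  set n := a.length with hndef
  by_cases hn : n = 0
  · have haz : a = [] := List.length_eq_zero_iff.mp hn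
    rw [if_pos (Or.inl hn)]
    simp [haz, solutionGo, PySem.Int.floordiv]
  · have h1 : 1 ≤ n := by omega
    by_cases hm : p.length = n
    · -- main case: n ≥ 1 and |B| = |A|
      rw [if_neg (not_or.mpr ⟨hn, by omega⟩)]
      have hTlen : (a ++ a).length = 2 * n := by rw [List.length_append]; omega
      have hs : (PySem.Int.floordiv (((a ++ a).length : Int) - 1) 2 + 1).toNat = n := by
        have hAA : (((a ++ a).length : Nat) : Int) - 1 = 2 * (n : Int) - 1 := by
          rw [hTlen]; push_cast; ring
        rw [hAA, start_index n h1]; simp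
      have he0 : (((a ++ a).length : Nat) : Int) - 1 = ((n : Nat) : Int) + ((n : Nat) : Int) - 1 := by
        rw [hTlen]; push_cast; ring
      rw [hs]
      have hA := solutionGo_char a p (by omega) n le_rfl
      have hz : ((a.length : Int) - ((n : Nat) : Int)) = (0 : Int) := by
        rw [← hndef]; ring
      rw [← hndef] at hA
      rw [hz] at hA
      have hgoal : solutionGo (a ++ a) p n ((((a ++ a).length : Nat) : Int) - 1) 0
          = solutionGo (a ++ a) p n (((n : Nat) : Int) + ((n : Nat) : Int) - 1) 0 := by
        rw [he0]
      rw [hgoal]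
      have hA' : solutionGo (a ++ a) p n (((n : Nat) : Int) + ((n : Nat) : Int) - 1) 0
          = if ∃ i ≤ n, 0 < i ∧ p <+: List.drop i (a ++ a)
            then (n : Int) - (Nat.findGreatest (fun i => 0 < i ∧ p <+: List.drop i (a ++ a)) n : Int)
            else -1 := by
        have harg : ((n : Nat) : Int) + ((n : Nat) : Int) - 1
            = ((n : Nat) : Int) + ((a.length : Nat) : Int) - 1 := by rw [← hndef]
        rw [harg]
        exact hA
      rw [hA']
      obtain ⟨hk, hbest⟩ := scan_aux p (a ++ a) n hm h1 hTlen (2 * n) le_rfl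
      set res := ((List.range (2 * n)).foldl
        (fun (st : Int × Nat) i =>
          let k := kmpStep p (buildFail p) ((a ++ a).getD i ' ') st.2
          if k = n then (((i : Int) - (n : Int) + 1), (buildFail p).getD (n - 1) 0)
          else (st.1, k)) (-1, 0)) with hres
      rcases hbest with ⟨hb1, hb2⟩ | ⟨e, he, hme, hbe, hmax⟩
      · -- no match anywhere: both -1
        rw [if_neg, hb1, if_pos (by norm_num)]
        rintro ⟨i, hin, hi0, hipre⟩
        have he' : i + n - 1 < 2 * n := by omega
        have := (match_iff_offset a p n rfl hm (i + n - 1) (by omega) he').mpr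
          (by have : i + n - 1 + 1 - n = i := by omega
              rw [this]; exact hipre)
        exact hb2 (i + n - 1) he' this
      · -- rightmost match at end e; i0 = e+1-n is the rightmost offset, i0 ≥ 1
        have hen : n - 1 ≤ e := by
          by_contra hlt
          push_neg at hlt
          exact no_short_match a p n rfl hm e (by omega) hme
        set i0 := e + 1 - n with hi0
        have hoff : p <+: (a ++ a).drop i0 :=
          (match_iff_offset a p n rfl hm e hen he).mp hme
        have hi0n : i0 ≤ n := by omega
        have hi0pos : 0 < i0 := by
          by_contra hz0
          push_neg at hz0
          have : i0 = 0 := by omega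
          rw [this] at hoff
          have hoffn := offset_zero a p n rfl hm hoff
          have hmn : p <:+ (a ++ a).take (2 * n - 1 + 1) :=
            (match_iff_offset a p n rfl hm (2 * n - 1) (by omega) (by omega)).mpr
              (by have : 2 * n - 1 + 1 - n = n := by omega
                  rw [this]; exact hoffn)
          have := hmax (2 * n - 1) (by omega) hmn
          omega
        have hEx : ∃ i ≤ n, 0 < i ∧ p <+: List.drop i (a ++ a) := ⟨i0, hi0n, hi0pos, hoff⟩
        rw [if_pos hEx]
        have hG : Nat.findGreatest (fun i => 0 < i ∧ p <+: List.drop i (a ++ a)) n = i0 := by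
          apply Nat.le_antisymm
          · by_contra hgt
            push_neg at hgt
            have hPG := Nat.findGreatest_spec (m := i0)
              (P := fun i => 0 < i ∧ p <+: List.drop i (a ++ a)) hi0n ⟨hi0pos, hoff⟩
            set G := Nat.findGreatest (fun i => 0 < i ∧ p <+: List.drop i (a ++ a)) n with hGdef
            have hGn : G ≤ n := Nat.findGreatest_le n
            rcases hPG with ⟨hG0, hGpre⟩
            have hGm : p <:+ (a ++ a).take (G + n - 1 + 1) :=
              (match_iff_offset a p n rfl hm (G + n - 1) (by omega) (by omega)).mpr
                (by have : G + n - 1 + 1 - n = G := by omega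
                    rw [this]; exact hGpre)
            have := hmax (G + n - 1) (by omega) hGm
            omega
          · exact Nat.le_findGreatest hi0n ⟨hi0pos, hoff⟩
        rw [hG, hbe]
        have hge0 : ¬ ((e : Int) - (n : Int) + 1 < 0) := by
          push_neg
          omega
        rw [if_neg hge0]
        have : ((i0 : Nat) : Int) = (e : Int) - (n : Int) + 1 := by omega
        rw [this]
    · -- length mismatch: both -1
      rw [if_pos (Or.inr (by omega))]
      have hs : (PySem.Int.floordiv (((a ++ a).length : Int) - 1) 2 + 1).toNat = n := by
        have hAA : (((a ++ a).length : Nat) : Int) - 1 = 2 * (n : Int) - 1 := by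
          rw [List.length_append]; push_cast; rw [← hndef]; ring
        rw [hAA, start_index n h1]; simp
      rw [hs]
      apply solutionGo_len_ne a p (by omega) n _ 0 le_rfl
      rw [List.length_append]
      push_cast
      omega
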